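-- pv_equiv track=rewrite | github.com/sumba101/Journal-Analyser | sub_app/WikiAndSemanticProcessing.py | subsection_helper
-- ===== SOURCE A (Python) =====
-- def subsection_helper(pg_content):
--     orig = "==="
--     repl = "+++"
--     for _ in range( 8 ):
--         pg_content = pg_content.replace( orig, repl )
--         orig += "="
--         repl += "+"
--     return pg_content
-- ===== SOURCE B (Python) =====
-- def subsection_helper(pg_content):
--     out = []
--     run = 0
--     for ch in pg_content:
--         if ch == '=':
--             run += 1
--         else:
--             out.append('+' * (3 * (run // 3)))
--             out.append('=' * (run % 3))
--             out.append(ch)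
--             run = 0
--     out.append('+' * (3 * (run // 3)))
--     out.append('=' * (run % 3))
--     return ''.join(out)
-- ===== Notes on version B (the rewrite author's own statement) =====
-- stated objective: simpler
-- what changed: A makes eight whole-string replace passes with growing equals-sign patterns; B makes one left-to-right scan that counts each maximal run of equals signs and emits three plus signs per complete group of three, keeping the leftover equals signs.
import Mathlib
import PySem

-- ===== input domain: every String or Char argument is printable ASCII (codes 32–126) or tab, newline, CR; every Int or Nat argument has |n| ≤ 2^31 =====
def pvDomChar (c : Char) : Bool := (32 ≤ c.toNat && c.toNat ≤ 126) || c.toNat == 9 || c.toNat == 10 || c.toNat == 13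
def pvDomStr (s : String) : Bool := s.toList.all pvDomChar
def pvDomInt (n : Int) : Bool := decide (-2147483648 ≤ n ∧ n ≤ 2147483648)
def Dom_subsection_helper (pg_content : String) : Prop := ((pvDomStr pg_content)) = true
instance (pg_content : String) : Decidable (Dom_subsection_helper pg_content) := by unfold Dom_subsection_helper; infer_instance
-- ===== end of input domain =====

-- B replaces A's eight whole-string replace passes by a single left-to-right run-length scan over the characters (objective: simpler one-pass algorithm).

-- ===== PORT A =====
def subsection_helper (pg_content : String) : String :=
  let st := (PySem.List.pyRange 0 8 1).foldl
    (fun (st : String × String × String) _ =>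
      (PySem.Str.replace st.1 st.2.1 st.2.2, st.2.1 ++ "=", st.2.2 ++ "+"))
    (pg_content, "===", "+++")
  st.1

-- ===== PORT B =====
def subsection_helper_alt (pg_content : String) : String :=
  let st := pg_content.toList.foldl
    (fun (st : List Char × Nat) ch =>
      if ch = '=' then (st.1, st.2 + 1)
      else (st.1 ++ List.replicate (3 * (st.2 / 3)) '+' ++ List.replicate (st.2 % 3) '=' ++ [ch], 0))
    ([], 0)
  String.ofList (st.1 ++ List.replicate (3 * (st.2 / 3)) '+' ++ List.replicate (st.2 % 3) '=')

-- ===== PRECONDITION & SPEC =====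
def Spec_subsection_helper (pg_content : String) (out : String) : Prop := out = subsection_helper_alt pg_content
instance (pg_content : String) (out : String) : Decidable (Spec_subsection_helper pg_content out) := by unfold Spec_subsection_helper; infer_instance

-- ===== CLAIM (what is proved, stated in full; the proofs are below) =====
def Claim_equal_subsection_helper : Prop := ∀ (pg_content : String), Dom_subsection_helper pg_content → Spec_subsection_helper pg_content (subsection_helper pg_content)

-- ===== LEMMAS AND PROOFS =====

/-- What one `replace "===" "+++"` pass computes, on char lists. -/
def rep (l : List Char) : List Char :=
  if h : ['=', '=', '='].isPrefixOf l then
    '+' :: '+' :: '+' :: rep (l.drop 3)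
  else
    match l with
    | [] => []
    | c :: t => c :: rep t
termination_by l.length
decreasing_by
  · have hp : ['=', '=', '='] <+: l := List.isPrefixOf_iff_prefix.mp h
    have := hp.length_le
    simp at this ⊢
    omega
  · simp

lemma rep_nil : rep [] = [] := by simp [rep]

lemma rep_eee (t : List Char) : rep ('=' :: '=' :: '=' :: t) = '+' :: '+' :: '+' :: rep t := by
  rw [rep]
  simp [List.isPrefixOf]

lemma rep_cons_of_not_pre {l : List Char} (h : ¬ ['=', '=', '='].isPrefixOf l) (c : Char)
    (t : List Char) (hl : l = c :: t) : rep l = c :: rep t := by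
  subst hl; rw [rep]; simp [h]

lemma go_spec (fuel : Nat) (l acc : List Char) (hf : l.length ≤ fuel) :
    PySem.Chars.replace.go ['=', '=', '='] ['+', '+', '+'] fuel l acc = acc.reverse ++ rep l := by
  induction fuel generalizing l acc with
  | zero =>
    have : l = [] := by cases l <;> simp_all
    subst this
    simp [PySem.Chars.replace.go, rep_nil]
  | succ n ih =>
    cases l with
    | nil => simp [PySem.Chars.replace.go, rep_nil]
    | cons c t =>
      rw [PySem.Chars.replace.go]
      by_cases h : ['=', '=', '='].isPrefixOf (c :: t)
      · cases t with
        | nil => simp [List.isPrefixOf] at h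
        | cons c2 t2 =>
          cases t2 with
          | nil => simp [List.isPrefixOf] at h
          | cons c3 t3 =>
            simp [List.isPrefixOf] at h
            obtain ⟨h1, h2, h3⟩ := h
            subst h1; subst h2; subst h3
            have hf3 : t3.length ≤ n := by simp at hf; omega
            simp only [List.isPrefixOf, beq_self_eq_true, Bool.true_and, if_true,
              List.length_cons, List.length_nil, List.drop_succ_cons, List.drop_zero]
            rw [ih t3 _ hf3, rep_eee]
            simp
      · simp only [h]
        have hft : t.length ≤ n := by simp at hf; omega
        rw [ih t (c :: acc) hft, rep_cons_of_not_pre h c t rfl]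
        simp

lemma replace_eq_rep (l : List Char) :
    PySem.Chars.replace l ['=', '=', '='] ['+', '+', '+'] = rep l := by
  rw [PySem.Chars.replace]
  simp
  exact go_spec l.length l [] le_rfl

/-- `replace` is the identity when the pattern does not occur. -/
lemma go_id (old new : List Char) (hold : old ≠ []) (fuel : Nat) :
    ∀ (l acc : List Char), ¬ old <:+: l →
      PySem.Chars.replace.go old new fuel l acc = acc.reverse ++ l := by
  induction fuel with
  | zero => intro l acc _; cases l <;> simp [PySem.Chars.replace.go]
  | succ n ih =>
    intro l acc hno
    cases l with
    | nil => simp [PySem.Chars.replace.go]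
    | cons c t =>
      rw [PySem.Chars.replace.go]
      have hnp : ¬ old.isPrefixOf (c :: t) := by
        intro h
        exact hno (List.isPrefixOf_iff_prefix.mp h).isInfix
      simp only [hnp]
      rw [ih t (c :: acc) (fun h => hno (h.trans (List.suffix_cons c t).isInfix))]
      simp

lemma replace_id (l old new : List Char) (hold : old ≠ []) (hno : ¬ old <:+: l) :
    PySem.Chars.replace l old new = l := by
  rw [PySem.Chars.replace]
  simp [List.isEmpty_iff, hold]
  rw [go_id old new hold l.length l [] hno]
  simp

def emit (run : Nat) : List Char :=
  List.replicate (3 * (run / 3)) '+' ++ List.replicate (run % 3) '='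

lemma replicate_eq_succ3 (n : Nat) :
    List.replicate (n + 3) '=' = '=' :: '=' :: '=' :: List.replicate n '=' := by
  simp [List.replicate_succ]

lemma emit_succ3 (n : Nat) : emit (n + 3) = '+' :: '+' :: '+' :: emit n := by
  unfold emit
  have h1 : 3 * ((n + 3) / 3) = (3 * (n / 3)) + 3 := by omega
  have h2 : (n + 3) % 3 = n % 3 := by omega
  rw [h1, h2]
  simp [List.replicate_succ]

lemma not_pre_head (c : Char) (hc : c ≠ '=') (t : List Char) :
    ¬ ['=', '=', '='].isPrefixOf (c :: t) := by
  simp only [List.isPrefixOf, Bool.and_eq_true, beq_iff_eq]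
  rintro ⟨h1, -⟩
  exact hc h1.symm

lemma rep_cons_ne (c : Char) (hc : c ≠ '=') (t : List Char) : rep (c :: t) = c :: rep t :=
  rep_cons_of_not_pre (not_pre_head c hc t) c t rfl

lemma rep_replicate_cons (c : Char) (hc : c ≠ '=') :
    ∀ (run : Nat) (t : List Char),
      rep (List.replicate run '=' ++ c :: t) = emit run ++ c :: rep t := by
  intro run
  induction run using Nat.strong_induction_on with
  | _ run ih =>
    intro t
    rcases Nat.lt_or_ge run 3 with h3 | h3
    · interval_cases run
      · simpa [emit] using rep_cons_ne c hc t
      · show rep ('=' :: c :: t) = emit 1 ++ c :: rep t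
        rw [rep_cons_of_not_pre ?hp '=' (c :: t) rfl, rep_cons_ne c hc t]
        · simp [emit]
        case hp =>
          simp only [List.isPrefixOf, Bool.and_eq_true, beq_iff_eq]
          rintro ⟨-, h2, -⟩
          exact hc h2.symm
      · show rep ('=' :: '=' :: c :: t) = emit 2 ++ c :: rep t
        rw [rep_cons_of_not_pre ?hp '=' ('=' :: c :: t) rfl,
            rep_cons_of_not_pre ?hq '=' (c :: t) rfl, rep_cons_ne c hc t]
        · simp [emit]
        case hp =>
          simp only [List.isPrefixOf, Bool.and_eq_true, beq_iff_eq]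
          rintro ⟨-, -, h3, -⟩
          exact hc h3.symm
        case hq =>
          simp only [List.isPrefixOf, Bool.and_eq_true, beq_iff_eq]
          rintro ⟨-, h2, -⟩
          exact hc h2.symm
    · obtain ⟨n, rfl⟩ : ∃ n, run = n + 3 := ⟨run - 3, by omega⟩
      rw [replicate_eq_succ3]
      simp only [List.cons_append]
      rw [rep_eee, ih n (by omega) t, emit_succ3]
      simp

lemma rep_replicate (run : Nat) : rep (List.replicate run '=') = emit run := by
  induction run using Nat.strong_induction_on with
  | _ run ih =>
    rcases Nat.lt_or_ge run 3 with h3 | h3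
    · interval_cases run
      · simp [rep_nil, emit]
      · show rep ['='] = emit 1
        rw [rep_cons_of_not_pre (by decide) '=' [] rfl, rep_nil]
        simp [emit]
      · show rep ['=', '='] = emit 2
        rw [rep_cons_of_not_pre (by decide) '=' ['='] rfl,
            rep_cons_of_not_pre (by decide) '=' [] rfl, rep_nil]
        simp [emit]
    · obtain ⟨n, rfl⟩ : ∃ n, run = n + 3 := ⟨run - 3, by omega⟩
      rw [replicate_eq_succ3, rep_eee, ih n (by omega), emit_succ3]

/-- A run of `=` at the start of `rep l` comes from a run at the start of `l`. -/
lemma replicate_prefix_rep (k : Nat) :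
    ∀ l : List Char, List.replicate k '=' <+: rep l → List.replicate k '=' <+: l := by
  intro l
  induction hl : l.length using Nat.strong_induction_on generalizing l k with
  | _ n ih =>
    subst hl
    cases k with
    | zero => simp
    | succ k =>
      intro hpre
      by_cases h : ['=', '=', '='].isPrefixOf l
      · rw [rep] at hpre
        simp only [h, dif_pos] at hpre
        rw [List.replicate_succ, List.cons_prefix_cons] at hpre
        exact absurd hpre.1 (by decide)
      · cases l with
        | nil => rw [rep_nil] at hpre; simp at hpre
        | cons c t =>
          rw [rep_cons_of_not_pre h c t rfl] at hpre
          rw [List.replicate_succ, List.cons_prefix_cons] at hpre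
          obtain ⟨hc, hrest⟩ := hpre
          have ht := ih t.length (by simp) k t rfl hrest
          rw [List.replicate_succ, List.cons_prefix_cons]
          exact ⟨hc, ht⟩

/-- The output of one replace pass contains no `===`. -/
lemma noEEE : ∀ l : List Char, ¬ (['=', '=', '='] <:+: rep l) := by
  intro l
  induction hl : l.length using Nat.strong_induction_on generalizing l with
  | _ n ih =>
    subst hl
    by_cases h : ['=', '=', '='].isPrefixOf l
    · have hp : ['=', '=', '='] <+: l := List.isPrefixOf_iff_prefix.mp h
      have hlen := hp.length_le
      rw [rep]
      simp only [h, dif_pos]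
      intro hinf
      have hlt : (l.drop 3).length < l.length := by simp at hlen ⊢; omega
      refine ih (l.drop 3).length hlt (l.drop 3) rfl ?_
      rcases List.infix_cons_iff.mp hinf with hpre | hinf2
      · simp [List.cons_prefix_cons] at hpre
      rcases List.infix_cons_iff.mp hinf2 with hpre | hinf3
      · simp [List.cons_prefix_cons] at hpre
      rcases List.infix_cons_iff.mp hinf3 with hpre | hinf4
      · simp [List.cons_prefix_cons] at hpre
      exact hinf4
    · cases l with
      | nil => rw [rep_nil]; simp
      | cons c t =>
        rw [rep_cons_of_not_pre h c t rfl]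
        intro hinf
        rcases List.infix_cons_iff.mp hinf with hpre | hinf2
        · have h2 : List.replicate 3 '=' <+: c :: t := by
            refine replicate_prefix_rep 3 (c :: t) ?_
            rw [rep_cons_of_not_pre h c t rfl]
            exact hpre
          exact h (List.isPrefixOf_iff_prefix.mpr h2)
        · exact ih t.length (by simp) t rfl hinf2

/-- B's fold computes `rep`. -/
lemma foldB : ∀ (l : List Char) (run : Nat) (out : List Char),
    (l.foldl
      (fun (st : List Char × Nat) ch =>
        if ch = '=' then (st.1, st.2 + 1)
        else (st.1 ++ List.replicate (3 * (st.2 / 3)) '+' ++ List.replicate (st.2 % 3) '=' ++ [ch], 0))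
      (out, run)).1
    ++ List.replicate (3 * ((l.foldl
      (fun (st : List Char × Nat) ch =>
        if ch = '=' then (st.1, st.2 + 1)
        else (st.1 ++ List.replicate (3 * (st.2 / 3)) '+' ++ List.replicate (st.2 % 3) '=' ++ [ch], 0))
      (out, run)).2 / 3)) '+'
    ++ List.replicate ((l.foldl
      (fun (st : List Char × Nat) ch =>
        if ch = '=' then (st.1, st.2 + 1)
        else (st.1 ++ List.replicate (3 * (st.2 / 3)) '+' ++ List.replicate (st.2 % 3) '=' ++ [ch], 0))
      (out, run)).2 % 3) '='
    = out ++ rep (List.replicate run '=' ++ l) := by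
  intro l
  induction l with
  | nil =>
    intro run out
    simp only [List.foldl_nil, List.append_nil]
    rw [rep_replicate]
    simp [emit]
  | cons c t ih =>
    intro run out
    by_cases hc : c = '='
    · subst hc
      simp only [List.foldl_cons, if_true]
      rw [ih (run + 1) out]
      congr 2
      rw [List.replicate_succ']
      simp
    · simp only [List.foldl_cons, if_neg hc]
      rw [ih 0 _]
      rw [rep_replicate_cons c hc run t]
      simp [emit]

lemma alt_eq_rep (s : String) : subsection_helper_alt s = String.ofList (rep s.toList) := by
  unfold subsection_helper_alt
  have := foldB s.toList 0 []
  simp only [List.append_assoc] at this ⊢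
  rw [this]
  simp

lemma infix_of_run_infix (k : Nat) (hk : 3 ≤ k) (x : List Char)
    (h : List.replicate k '=' <:+: x) : ['=', '=', '='] <:+: x := by
  have hsplit : List.replicate k '=' = List.replicate 3 '=' ++ List.replicate (k - 3) '=' := by
    rw [← List.replicate_add]
    congr 1
    omega
  have hpre : (['=', '=', '='] : List Char) <+: List.replicate k '=' :=
    ⟨List.replicate (k - 3) '=', hsplit.symm⟩
  exact hpre.isInfix.trans h

lemma str_replace_id (x o n : String) (k : Nat) (hk : 3 ≤ k)
    (ho : o.toList = List.replicate k '=')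
    (hno : ¬ (['=', '=', '='] <:+: x.toList)) : PySem.Str.replace x o n = x := by
  rw [PySem.Str.replace, replace_id]
  · exact String.ofList_toList
  · rw [ho]
    intro h
    have := congrArg List.length h
    simp at this
    omega
  · rw [ho]
    intro h
    exact hno (infix_of_run_infix k hk _ h)

lemma str_first (s : String) :
    PySem.Str.replace s "===" "+++" = String.ofList (rep s.toList) := by
  rw [PySem.Str.replace]
  congr 1
  rw [show ("===" : String).toList = ['=', '=', '='] from rfl,
      show ("+++" : String).toList = ['+', '+', '+'] from rfl,
      replace_eq_rep]

lemma a_eq_rep (s : String) : subsection_helper s = String.ofList (rep s.toList) := by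
  unfold subsection_helper
  rw [show PySem.List.pyRange 0 8 1 = [0, 1, 2, 3, 4, 5, 6, 7] from by decide]
  simp only [List.foldl_cons, List.foldl_nil]
  rw [str_first]
  have hno : ¬ (['=', '=', '='] <:+: (String.ofList (rep s.toList)).toList) := by
    rw [String.toList_ofList]
    exact noEEE s.toList
  rw [str_replace_id _ _ _ 4 (by omega) (by decide) hno,
      str_replace_id _ _ _ 5 (by omega) (by decide) hno,
      str_replace_id _ _ _ 6 (by omega) (by decide) hno,
      str_replace_id _ _ _ 7 (by omega) (by decide) hno,
      str_replace_id _ _ _ 8 (by omega) (by decide) hno,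
      str_replace_id _ _ _ 9 (by omega) (by decide) hno,
      str_replace_id _ _ _ 10 (by omega) (by decide) hno]

-- ===== VERDICT (by name: the statement is the Claim_ definition above) =====
theorem subsection_helper_spec : Claim_equal_subsection_helper := by
  intro s _
  unfold Spec_subsection_helper
  rw [a_eq_rep, alt_eq_rep]
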